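-- pv_equiv track=rewrite | github.com/leakless21/maie | src/utils/sanitization.py | remove_control_characters
-- ===== SOURCE A (Python) =====
-- from typing import Any, List, Set, Optional
--
-- def remove_control_characters(text: str, allowed_chars: Optional[List[str]] = None) -> str:
--     """Remove control characters from text, preserving allowed ones.
--
--     Args:
--         text: Text to clean
--         allowed_chars: List of allowed control characters (e.g., ['\n', '\t'])
--
--     Returns:
--         Text with control characters removed
--
--     Examples:
--         >>> remove_control_characters("Hello\x00World")
--         'HelloWorld'
--         >>> remove_control_characters("Line1\\nLine2", allowed_chars=['\\n'])
--         'Line1\\nLine2'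
--     """
--     if allowed_chars is None:
--         allowed_chars = []
--
--     # Convert allowed_chars to set of ordinals for faster lookup
--     allowed_ordinals = {ord(c) for c in allowed_chars if len(c) == 1}
--
--     result = []
--     for char in text:
--         if ord(char) < 32 and ord(char) not in allowed_ordinals:
--             continue  # Skip control character
--         result.append(char)
--
--     return ''.join(result)
-- ===== SOURCE B (Python) =====
-- from typing import List, Optional
--
--
-- def remove_control_characters(text: str, allowed_chars: Optional[List[str]] = None) -> str:
--     """Remove control characters from text, preserving allowed ones.
--
--     Table-driven: precompute a deletion table over the 32 control code
--     points and hand the whole pass to str.translate (no per-char loop).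
--     """
--     if allowed_chars is None:
--         allowed_chars = []
--     allowed_ordinals = {ord(c) for c in allowed_chars if len(c) == 1}
--     table = {c: None for c in range(32) if c not in allowed_ordinals}
--     return text.translate(table)
-- ===== Notes on version B (the rewrite author's own statement) =====
-- stated objective: idiomatic
-- what changed: Replaced the explicit per-character loop with branches by a precomputed deletion table over the 32 control code points handed to str.translate (table-driven delete, no Python-level loop).
import Mathlib
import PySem

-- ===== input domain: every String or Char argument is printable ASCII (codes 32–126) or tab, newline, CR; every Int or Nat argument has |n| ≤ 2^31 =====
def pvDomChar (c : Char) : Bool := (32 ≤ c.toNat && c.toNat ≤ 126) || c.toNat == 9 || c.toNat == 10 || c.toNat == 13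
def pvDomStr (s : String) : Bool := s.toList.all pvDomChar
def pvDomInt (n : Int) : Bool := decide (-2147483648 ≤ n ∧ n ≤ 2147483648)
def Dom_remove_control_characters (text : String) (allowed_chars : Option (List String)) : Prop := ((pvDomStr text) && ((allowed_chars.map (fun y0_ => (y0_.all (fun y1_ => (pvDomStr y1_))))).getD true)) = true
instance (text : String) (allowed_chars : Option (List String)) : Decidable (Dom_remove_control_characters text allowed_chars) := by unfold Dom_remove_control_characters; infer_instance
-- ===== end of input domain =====

-- B replaces A's per-character loop-and-branch by a precomputed deletion table over
-- the 32 control code points handed to str.translate (idiomatic, table-driven).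


-- ===== PORT A =====
-- {ord(c) for c in allowed_chars if len(c) == 1}
def pvAllowedOrdinals (allowed_chars : List String) : PySem.Set Int :=
  PySem.Set.ofList (allowed_chars.filterMap (fun c =>
    match c.toList with
    | [ch] => some ((ch.toNat : Int))
    | _ => none))

def remove_control_characters (text : String) (allowed_chars : Option (List String)) : String :=
  let ac := allowed_chars.getD []
  let allowed_ordinals := pvAllowedOrdinals ac
  let result := text.toList.foldl (fun r ch =>
    if (ch.toNat : Int) < 32 ∧ allowed_ordinals.contains (ch.toNat : Int) = false then r
    else r ++ [ch]) []
  String.mk result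

-- ===== PORT B =====
-- {c: None for c in range(32) if c not in allowed_ordinals}
def pvDeleteTable (allowed_ordinals : PySem.Set Int) : PySem.Dict Int (Option String) :=
  (PySem.List.pyRange 0 32 1).foldl (fun d c =>
    if allowed_ordinals.contains c then d else d.insert c none) PySem.Dict.empty

-- text.translate(table): every value in the table is None, so translate keeps
-- exactly the characters whose code point has no table entry (exact here).
def remove_control_characters_alt (text : String) (allowed_chars : Option (List String)) : String :=
  let ac := allowed_chars.getD []
  let allowed_ordinals := pvAllowedOrdinals ac
  let table := pvDeleteTable allowed_ordinals
  String.mk (text.toList.filter (fun ch => (table.get? (ch.toNat : Int)).isNone))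

-- ===== PRECONDITION & SPEC =====
def Spec_remove_control_characters (text : String) (allowed_chars : Option (List String)) (out : String) : Prop := out = remove_control_characters_alt text allowed_chars
instance (text : String) (allowed_chars : Option (List String)) (out : String) : Decidable (Spec_remove_control_characters text allowed_chars out) := by unfold Spec_remove_control_characters; infer_instance

-- ===== CLAIM (what is proved, stated in full; the proofs are below) =====
def Claim_equal_remove_control_characters : Prop := ∀ (text : String) (allowed_chars : Option (List String)), Dom_remove_control_characters text allowed_chars → Spec_remove_control_characters text allowed_chars (remove_control_characters text allowed_chars)

-- ===== LEMMAS AND PROOFS =====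

theorem pvDeleteTable_get? (allowed : PySem.Set Int) (l : List Int)
    (d : PySem.Dict Int (Option String)) (x : Int) :
    (l.foldl (fun d c => if allowed.contains c then d else d.insert c none) d).get? x =
      if x ∈ l ∧ x ∉ allowed then some none else d.get? x := by
  induction l generalizing d with
  | nil => simp
  | cons c l ih =>
    simp only [List.foldl_cons, ih]
    by_cases hx : x ∈ l ∧ x ∉ allowed
    · simp [hx, List.mem_cons]
    · have hcons : ¬ (x ∈ c :: l ∧ x ∉ allowed) ∨ x = c := by
        by_cases hxc : x = c
        · exact Or.inr hxc
        · refine Or.inl ?_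
          rintro ⟨hm, hc⟩
          rcases List.mem_cons.mp hm with h | h
          · exact hxc h
          · exact hx ⟨h, hc⟩
      by_cases hxc : x = c
      · subst hxc
        by_cases ha : x ∈ allowed
        · have : allowed.contains x = true := by simpa using ha
          simp [ha]
        · have : allowed.contains x = false := by simpa using ha
          simp [PySem.Dict.get?_insert_self, List.mem_cons, ha]
      · rcases hcons with hcons | hcons
        · by_cases ha : allowed.contains c = true
          · simp only [ha, if_true, if_neg hx, if_neg hcons]
          · simp only [Bool.not_eq_true] at ha
            simp only [ha, Bool.false_eq_true, if_false]
            rw [PySem.Dict.get?_insert_of_ne _ _ hxc, if_neg hx, if_neg hcons]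
        · exact absurd hcons hxc

theorem pv_foldl_skip_eq_filter (p : Char → Prop) [DecidablePred p] (l : List Char) (acc : List Char) :
    l.foldl (fun r ch => if p ch then r else r ++ [ch]) acc
      = acc ++ l.filter (fun ch => decide ¬ p ch) := by
  induction l generalizing acc with
  | nil => simp
  | cons c l ih =>
    by_cases h : p c
    · simp [h, ih]
    · simp [h, ih]

theorem pv_keep_iff (allowed : PySem.Set Int) (ch : Char) :
    (decide ¬ ((ch.toNat : Int) < 32 ∧ allowed.contains (ch.toNat : Int) = false))
      = ((pvDeleteTable allowed).get? (ch.toNat : Int)).isNone := by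
  unfold pvDeleteTable
  rw [pvDeleteTable_get? allowed]
  have hb : allowed.contains (ch.toNat : Int) = false ↔ (ch.toNat : Int) ∉ allowed := by simp
  by_cases h : (ch.toNat : Int) < 32 ∧ allowed.contains (ch.toNat : Int) = false
  · rw [if_pos ⟨PySem.List.mem_pyRange_one.mpr ⟨Int.natCast_nonneg _, h.1⟩, hb.mp h.2⟩]
    simp only [Option.isNone_some, decide_eq_false_iff_not, not_not]
    exact h
  · rw [if_neg]
    · simp only [PySem.Dict.empty, PySem.Dict.get?, List.find?_nil, Option.map_none,
        Option.isNone_none, decide_eq_true_eq]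
      exact h
    · rintro ⟨hm, hc⟩
      exact h ⟨(PySem.List.mem_pyRange_one.mp hm).2, hb.mpr hc⟩

theorem remove_control_characters_eq (text : String) (allowed_chars : Option (List String)) :
    remove_control_characters text allowed_chars = remove_control_characters_alt text allowed_chars := by
  unfold remove_control_characters remove_control_characters_alt
  dsimp only
  rw [pv_foldl_skip_eq_filter
    (fun ch => (ch.toNat : Int) < 32 ∧ (pvAllowedOrdinals (allowed_chars.getD [])).contains (ch.toNat : Int) = false)]
  rw [List.nil_append]
  congr 1
  apply List.filter_congr
  intro ch _
  exact pv_keep_iff (pvAllowedOrdinals (allowed_chars.getD [])) ch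

-- ===== VERDICT (by name: the statement is the Claim_ definition above) =====
theorem remove_control_characters_spec : Claim_equal_remove_control_characters := by
  intro text allowed_chars _
  exact remove_control_characters_eq text allowed_chars
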